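-- pv_equiv track=rewrite | github.com/joonyi/Leetcode | 565ArrNesting.py | arrayNesting2
-- ===== SOURCE A (Python) =====
-- def arrayNesting2(nums):
--     ans = 0
--     step = 0
--     seen = [False] * len(nums)
--     for i in range(len(nums)):
--         while not seen[i]:
--             seen[i] = True
--             i = nums[i]
--             step += 1
--         ans = max(ans, step)
--         step = 0
--     return ans
-- ===== SOURCE B (Python) =====
-- # Label propagation instead of cycle walking: m[w] converges to the smallest start
-- # index that can reach slot w by following the array, the answer is the size of the
-- # largest group of slots sharing a label (objective: alternative algorithm).
-- def arrayNesting2(nums):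
--     n = len(nums)
--     m = list(range(n))
--     changed = True
--     while changed:
--         changed = False
--         for u in range(n):
--             t = nums[u]
--             if m[u] < m[t]:
--                 m[t] = m[u]
--                 changed = True
--     counts = [0] * n
--     for lbl in m:
--         counts[lbl] += 1
--     return max(counts, default=0)
-- ===== Notes on version B (the rewrite author's own statement) =====
-- stated objective: alternative
-- what changed: Replaces A's visited-flag cycle walking (follow nums from each start, counting steps until a seen slot) by a label-propagation fixpoint: m[w] is relaxed to the least start index that reaches w, and the answer is the size of the largest label class read off a histogram; Pre_ excludes inputs holding a value outside [-len(nums), len(nums)), on which both A and B raise IndexError.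
import Mathlib
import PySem

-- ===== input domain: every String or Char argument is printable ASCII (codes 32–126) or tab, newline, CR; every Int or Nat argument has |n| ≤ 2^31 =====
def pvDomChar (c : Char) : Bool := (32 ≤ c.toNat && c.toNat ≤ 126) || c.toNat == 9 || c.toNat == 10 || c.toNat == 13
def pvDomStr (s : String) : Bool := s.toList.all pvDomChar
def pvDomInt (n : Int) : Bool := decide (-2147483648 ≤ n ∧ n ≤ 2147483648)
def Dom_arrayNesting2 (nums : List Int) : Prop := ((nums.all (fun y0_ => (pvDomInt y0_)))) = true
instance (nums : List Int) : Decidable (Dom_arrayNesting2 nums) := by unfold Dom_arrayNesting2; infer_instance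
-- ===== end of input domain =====

-- B replaces A's visited-flag cycle walking by label propagation to a fixpoint:
-- m[w] converges to the least start index that reaches w, and the answer is the
-- largest label class (objective: alternative algorithm, not claimed faster).

-- ===== PORT A =====
-- inner 'while not seen[i]:' loop of A; the fuel (length+1) only makes the recursion
-- total — each iteration marks one unseen slot, so it never runs out where Python returns
def walkA (nums : List Int) : Nat → List Bool → Int → Int → List Bool × Int
  | 0, seen, _, step => (seen, step)
  | fuel+1, seen, i, step =>
    match PySem.List.pyGet? seen i with
    | none => (seen, step)            -- IndexError reading seen[i]: outside Pre_
    | some true => (seen, step)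
    | some false =>
      let seen' := PySem.List.pySetD seen i true
      match PySem.List.pyGet? nums i with
      | none => (seen', step + 1)     -- IndexError reading nums[i]: outside Pre_
      | some j => walkA nums fuel seen' j (step + 1)

def arrayNesting2 (nums : List Int) : Int :=
  let n := nums.length
  let res := (PySem.List.pyRange 0 (n : Int) 1).foldl
    (fun st i =>
      let r := walkA nums (n+1) st.1 i st.2.2
      (r.1, max st.2.1 r.2, (0 : Int)))
    (List.replicate n false, (0 : Int), (0 : Int))
  res.2.1

-- ===== PORT B =====
-- one execution of B's 'for u in range(n):' body over the whole range
def passB (nums : List Int) (st : List Int × Bool) : List Int × Bool :=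
  (PySem.List.pyRange 0 (nums.length : Int) 1).foldl
    (fun st u =>
      match PySem.List.pyGet? nums u with
      | none => st                    -- IndexError reading nums[u]: outside Pre_
      | some t =>
        match PySem.List.pyGet? st.1 t with
        | none => st                  -- IndexError reading m[t]: outside Pre_
        | some mt =>
          let mu := PySem.List.pyGetD st.1 u 0
          if mu < mt then (PySem.List.pySetD st.1 t mu, true) else st)
    st

-- B's 'while changed:' loop; fuel (length+1) only makes it total — the proof shows
-- the fixpoint is reached within that many passes wherever Python's loop exits
def loopB (nums : List Int) : Nat → List Int → List Int
  | 0, m => m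
  | fuel+1, m =>
    let r := passB nums (m, false)
    if r.2 then loopB nums fuel r.1 else r.1

def arrayNesting2_alt (nums : List Int) : Int :=
  let n := nums.length
  let m := loopB nums (n+1) (PySem.List.pyRange 0 (n : Int) 1)
  let counts := m.foldl
    (fun cs lbl => PySem.List.pySetD cs lbl (PySem.List.pyGetD cs lbl 0 + 1))
    (List.replicate n (0 : Int))
  PySem.List.maxD counts (fun x => x) 0

-- ===== PRECONDITION & SPEC =====
-- A raises IndexError as soon as it meets a value outside [-len(nums), len(nums));
-- Pre_ excludes exactly those inputs (B raises there too).
def Pre_arrayNesting2 (nums : List Int) : Prop :=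
  ∀ v ∈ nums, -(nums.length : Int) ≤ v ∧ v < (nums.length : Int)
instance (nums : List Int) : Decidable (Pre_arrayNesting2 nums) := by
  unfold Pre_arrayNesting2; infer_instance
def pvWitness_arrayNesting2 : List Int := [1, 0, 0]

def Spec_arrayNesting2 (nums : List Int) (out : Int) : Prop := out = arrayNesting2_alt nums
instance (nums : List Int) (out : Int) : Decidable (Spec_arrayNesting2 nums out) := by
  unfold Spec_arrayNesting2; infer_instance

-- ===== CLAIM (what is proved, stated in full; the proofs are below) =====
def Claim_equal_arrayNesting2 : Prop :=
  ∀ (nums : List Int), Dom_arrayNesting2 nums → Pre_arrayNesting2 nums →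
    Spec_arrayNesting2 nums (arrayNesting2 nums)

-- ===== LEMMAS AND PROOFS =====

-- the Nat index Python's negative-wrapping list indexing actually reads, for -n ≤ i < n
def widx (n : Nat) (i : Int) : Nat := if i < 0 then (i + n).toNat else i.toNat

-- the slot-successor function of the functional graph described by nums
def gfun (nums : List Int) (w : Nat) : Nat := widx nums.length (nums.getD w 0)

-- bounded reachability test (paths of length ≤ n suffice, by iterate_shorten below)
def reachB (g : Nat → Nat) (n s w : Nat) : Bool :=
  (List.range (n+1)).any fun k => g^[k] s == w

lemma reachB_self (g : Nat → Nat) (n w : Nat) : reachB g n w w = true := by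
  simp [reachB]
  exact ⟨0, by omega, rfl⟩

-- M w: the least start index from which slot w is reachable
def Mlbl (g : Nat → Nat) (n : Nat) (w : Nat) : Nat :=
  Nat.find (⟨w, reachB_self g n w⟩ : ∃ s, reachB g n s w = true)

-- size of the label class of s
def cnt (g : Nat → Nat) (n s : Nat) : Nat :=
  ((List.range n).filter (fun w => Mlbl g n w = s)).length

-- Nat-level model of A's inner walk: the list of newly marked slots, in order
def mwalk (g : Nat → Nat) : Nat → List Bool → Nat → List Nat
  | 0, _, _ => []
  | fuel+1, seen, c =>
    if seen.getD c false then [] else c :: mwalk g fuel (seen.set c true) (g c)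

def markAll (seen : List Bool) (l : List Nat) : List Bool :=
  l.foldl (fun s c => s.set c true) seen

-- Nat-level model of one step of B's inner loop
def mstep (g : Nat → Nat) (st : List Int × Bool) (u : Nat) : List Int × Bool :=
  if st.1.getD u 0 < st.1.getD (g u) 0 then (st.1.set (g u) (st.1.getD u 0), true)
  else st

def mpass (g : Nat → Nat) (n : Nat) (st : List Int × Bool) : List Int × Bool :=
  (List.range n).foldl (mstep g) st

def Mlist (g : Nat → Nat) (n : Nat) : List Int :=
  (List.range n).map (fun w => (Mlbl g n w : Int))

-- ---- elementary index bridges ----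

lemma widx_lt (n : Nat) (i : Int) (h1 : -(n : Int) ≤ i) (h2 : i < (n : Int)) :
    widx n i < n := by unfold widx; split <;> omega

lemma widx_natCast (n k : Nat) : widx n (k : Int) = k := by
  unfold widx; split <;> omega

lemma getD_eq_getElem' {α : Type} (l : List α) (k : Nat) (d : α) (h : k < l.length) :
    l.getD k d = l[k] := by
  simp [List.getD_eq_getElem?_getD, List.getElem?_eq_getElem h]

lemma getD_set_eq {α : Type} (l : List α) (k k' : Nat) (v d : α)
    (hk' : k' < l.length) :
    (l.set k v).getD k' d = if k' = k then v else l.getD k' d := by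
  have hlen : (l.set k v).length = l.length := by simp
  rw [getD_eq_getElem' _ _ _ (by omega), getD_eq_getElem' _ _ _ hk']
  rw [List.getElem_set]
  split <;> split <;> first | rfl | omega

lemma pyGet?_widx {α : Type} (xs : List α) (i : Int) (d : α)
    (h1 : -(xs.length : Int) ≤ i) (h2 : i < (xs.length : Int)) :
    PySem.List.pyGet? xs i = some (xs.getD (widx xs.length i) d) := by
  rcases lt_or_ge i 0 with hi | hi
  · have hk1 : 0 < (-i).toNat := by omega
    have hk2 : (-i).toNat ≤ xs.length := by omega
    have hi' : i = -(((-i).toNat : Nat) : Int) := by omega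
    have hlt : xs.length - (-i).toNat < xs.length := by omega
    have hwx : widx xs.length (-(((-i).toNat : Nat) : Int)) = xs.length - (-i).toNat := by
      unfold widx; split <;> omega
    rw [hi', PySem.List.pyGet?_neg_natCast xs (-i).toNat hk1 hk2, hwx,
      getD_eq_getElem' _ _ _ hlt, List.getElem?_eq_getElem hlt]
  · have h3 : i.toNat < xs.length := by omega
    have hwx : widx xs.length i = i.toNat := by unfold widx; split <;> omega
    rw [PySem.List.pyGet?_of_nonneg xs hi, hwx,
      getD_eq_getElem' _ _ _ h3, List.getElem?_eq_getElem h3]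

lemma pySetD_widx {α : Type} (xs : List α) (i : Int) (v : α)
    (h1 : -(xs.length : Int) ≤ i) (h2 : i < (xs.length : Int)) :
    PySem.List.pySetD xs i v = xs.set (widx xs.length i) v := by
  rcases lt_or_ge i 0 with hi | hi
  · have hwx : widx xs.length i = xs.length - (-i).toNat := by
      unfold widx; split <;> omega
    rw [hwx]
    simp only [PySem.List.pySetD, PySem.List.pySet?, PySem.List.pyIdx?,
      if_neg (by omega : ¬ (0:Int) ≤ i), if_pos h1]
    simp
  · have hwx : widx xs.length i = i.toNat := by unfold widx; split <;> omega
    rw [hwx]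
    simp only [PySem.List.pySetD, PySem.List.pySet?, PySem.List.pyIdx?,
      if_pos hi, if_pos h2]
    simp

lemma count_false_set (seen : List Bool) (c : Nat) (hc : c < seen.length)
    (h : seen.getD c false = false) :
    (seen.set c true).count false + 1 = seen.count false := by
  induction seen generalizing c with
  | nil => simp at hc
  | cons b t ih =>
    cases c with
    | zero =>
      have hb : b = false := by simpa using h
      subst hb
      simp
    | succ c =>
      have h' : t.getD c false = false := by simpa using h
      have hc' : c < t.length := by simpa using hc
      have := ih c hc' h'
      simp only [List.set_cons_succ, List.count_cons]
      omega

-- ---- iterates of a self-map of [0, n) ----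

lemma iter_lt (g : Nat → Nat) (n : Nat) (H : ∀ w < n, g w < n)
    (s : Nat) (hs : s < n) (k : Nat) : g^[k] s < n := by
  induction k with
  | zero => simpa using hs
  | succ k ih => rw [Function.iterate_succ_apply']; exact H _ ih

lemma iter_shorten (g : Nat → Nat) (n : Nat) (H : ∀ w < n, g w < n)
    (s : Nat) (hs : s < n) (k : Nat) : ∃ k' < n, g^[k'] s = g^[k] s := by
  induction k using Nat.strong_induction_on with
  | _ k ih =>
    by_cases hk : k < n
    · exact ⟨k, hk, rfl⟩
    · have hmap : ∀ j ∈ Finset.range (n+1), g^[j] s ∈ Finset.range n := fun j _ =>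
        Finset.mem_range.mpr (iter_lt g n H s hs j)
      obtain ⟨i, hi, j, hj, hne, heq⟩ :=
        Finset.exists_ne_map_eq_of_card_lt_of_maps_to (by simp) hmap
      have main : ∀ a b : Nat, a < b → b ≤ n → g^[a] s = g^[b] s →
          ∃ k' < n, g^[k'] s = g^[k] s := by
        intro a b hab hbn he
        have key : g^[k] s = g^[k - (b - a)] s := by
          calc g^[k] s = g^[(k-b)+b] s := by congr 1; omega
          _ = g^[k-b] (g^[b] s) := by rw [Function.iterate_add_apply]
          _ = g^[k-b] (g^[a] s) := by rw [he]
          _ = g^[(k-b)+a] s := by rw [← Function.iterate_add_apply]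
          _ = g^[k-(b-a)] s := by congr 1; omega
        have hlt : k - (b - a) < k := by omega
        obtain ⟨k', hk', hke⟩ := ih _ hlt
        exact ⟨k', hk', by rw [hke, ← key]⟩
      have hi' : i < n + 1 := Finset.mem_range.mp hi
      have hj' : j < n + 1 := Finset.mem_range.mp hj
      rcases Nat.lt_trichotomy i j with hij | hij | hij
      · exact main i j hij (by omega) heq
      · exact absurd hij hne
      · exact main j i hij (by omega) heq.symm

-- ---- facts about M ----

lemma Mlbl_le_self (g : Nat → Nat) (n w : Nat) : Mlbl g n w ≤ w :=
  Nat.find_min' _ (reachB_self g n w)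

lemma Mlbl_lt (g : Nat → Nat) (n w : Nat) (hw : w < n) : Mlbl g n w < n :=
  lt_of_le_of_lt (Mlbl_le_self g n w) hw

lemma reachB_iff (g : Nat → Nat) (n : Nat) (H : ∀ w < n, g w < n)
    (s w : Nat) (hs : s < n) : reachB g n s w = true ↔ ∃ k, g^[k] s = w := by
  constructor
  · intro h
    simp [reachB, List.any_eq_true] at h
    obtain ⟨k, _, hk⟩ := h
    exact ⟨k, hk⟩
  · rintro ⟨k, hk⟩
    obtain ⟨k', hk', he⟩ := iter_shorten g n H s hs k
    simp [reachB, List.any_eq_true]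
    exact ⟨k', by omega, by rw [he, hk]⟩

lemma Mlbl_reaches (g : Nat → Nat) (n w : Nat) (H : ∀ w < n, g w < n) (hw : w < n) :
    ∃ k, g^[k] (Mlbl g n w) = w := by
  have h := Nat.find_spec (⟨w, reachB_self g n w⟩ : ∃ s, reachB g n s w = true)
  exact (reachB_iff g n H _ w (Mlbl_lt g n w hw)).mp h

lemma Mlbl_min (g : Nat → Nat) (n : Nat) (H : ∀ w < n, g w < n)
    (s w : Nat) (hs : s < n) (hr : ∃ k, g^[k] s = w) : Mlbl g n w ≤ s :=
  Nat.find_min' _ ((reachB_iff g n H s w hs).mpr hr)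

lemma Mlbl_g (g : Nat → Nat) (n : Nat) (H : ∀ w < n, g w < n)
    (w : Nat) (hw : w < n) : Mlbl g n (g w) ≤ Mlbl g n w := by
  obtain ⟨k, hk⟩ := Mlbl_reaches g n w H hw
  exact Mlbl_min g n H _ _ (Mlbl_lt g n w hw)
    ⟨k + 1, by rw [Function.iterate_succ_apply', hk]⟩

-- ---- the walk model: path shape, membership, marking ----

lemma mwalk_eq_nil (g : Nat → Nat) (fuel : Nat) (seen : List Bool) (c : Nat)
    (hsc : seen.getD c false = true) : mwalk g (fuel+1) seen c = [] := by
  rw [mwalk, hsc]; simp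

lemma mwalk_eq_cons (g : Nat → Nat) (fuel : Nat) (seen : List Bool) (c : Nat)
    (hsc : seen.getD c false = false) :
    mwalk g (fuel+1) seen c = c :: mwalk g fuel (seen.set c true) (g c) := by
  rw [mwalk, hsc]; simp

lemma mwalk_path (g : Nat → Nat) (n : Nat) (H : ∀ w < n, g w < n) :
    ∀ (fuel : Nat) (seen : List Bool) (c : Nat), seen.length = n → c < n →
      seen.count false < fuel →
      (∀ i (hi : i < (mwalk g fuel seen c).length), (mwalk g fuel seen c)[i] = g^[i] c) ∧
      (seen.getD (g^[(mwalk g fuel seen c).length] c) false = true ∨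
        g^[(mwalk g fuel seen c).length] c ∈ mwalk g fuel seen c) := by
  intro fuel
  induction fuel with
  | zero => intro seen c hlen hc hf; omega
  | succ fuel ih =>
    intro seen c hlen hc hf
    cases hsc : seen.getD c false with
    | true =>
      rw [mwalk_eq_nil g fuel seen c hsc]
      refine ⟨by intro i hi; simp at hi, Or.inl ?_⟩
      simpa using hsc
    | false =>
      have hlt : (seen.set c true).count false < fuel := by
        have := count_false_set seen c (by omega) hsc; omega
      obtain ⟨hget, hstop⟩ := ih (seen.set c true) (g c) (by simpa using hlen)
        (H c hc) hlt
      rw [mwalk_eq_cons g fuel seen c hsc]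
      constructor
      · intro i hi
        cases i with
        | zero => simp
        | succ i =>
          simp only [List.getElem_cons_succ]
          rw [Function.iterate_succ_apply]
          exact hget i (by simpa using hi)
      · simp only [List.length_cons]
        rw [Function.iterate_succ_apply]
        have hdlt : g^[(mwalk g fuel (seen.set c true) (g c)).length] (g c) < n :=
          iter_lt g n H (g c) (H c hc) _
        rcases hstop with hstop | hstop
        · by_cases hdc : g^[(mwalk g fuel (seen.set c true) (g c)).length] (g c) = c
          · exact Or.inr (by rw [hdc]; simp)
          · left
            rwa [getD_set_eq _ _ _ _ _ (by omega), if_neg hdc] at hstop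
        · exact Or.inr (List.mem_cons_of_mem _ hstop)

lemma mwalk_mem_not_seen (g : Nat → Nat) :
    ∀ (fuel : Nat) (seen : List Bool) (c : Nat) (x : Nat),
      x ∈ mwalk g fuel seen c → x < seen.length → seen.getD x false = false := by
  intro fuel
  induction fuel with
  | zero => intro seen c x hx _; simp [mwalk] at hx
  | succ fuel ih =>
    intro seen c x hx hxlen
    cases hsc : seen.getD c false with
    | true => rw [mwalk, hsc] at hx; simp at hx
    | false =>
      simp only [mwalk, hsc, Bool.false_eq_true, if_neg, List.mem_cons,
        not_false_eq_true] at hx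
      rcases hx with hx | hx
      · exact hx ▸ hsc
      · have hrec := ih (seen.set c true) (g c) x hx (by simpa using hxlen)
        rw [getD_set_eq _ _ _ _ _ (by simpa using hxlen)] at hrec
        split at hrec
        · exact absurd hrec (by simp)
        · exact hrec

lemma mwalk_mem_lt (g : Nat → Nat) (n : Nat) (H : ∀ w < n, g w < n) :
    ∀ (fuel : Nat) (seen : List Bool) (c : Nat), c < n →
      ∀ x ∈ mwalk g fuel seen c, x < n := by
  intro fuel
  induction fuel with
  | zero => intro seen c _ x hx; simp [mwalk] at hx
  | succ fuel ih =>
    intro seen c hc x hx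
    cases hsc : seen.getD c false with
    | true => rw [mwalk, hsc] at hx; simp at hx
    | false =>
      simp only [mwalk, hsc, Bool.false_eq_true, if_neg, List.mem_cons,
        not_false_eq_true] at hx
      rcases hx with hx | hx
      · omega
      · exact ih (seen.set c true) (g c) (H c hc) x hx

lemma mwalk_nodup (g : Nat → Nat) :
    ∀ (fuel : Nat) (seen : List Bool) (c : Nat), c < seen.length →
      (∀ w < seen.length, g w < seen.length) →
      (mwalk g fuel seen c).Nodup := by
  intro fuel
  induction fuel with
  | zero => intro seen c _ _; simp [mwalk]
  | succ fuel ih =>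
    intro seen c hc hG
    cases hsc : seen.getD c false with
    | true => rw [mwalk, hsc]; simp
    | false =>
      simp only [mwalk, hsc, Bool.false_eq_true, if_neg, not_false_eq_true]
      refine List.Nodup.cons ?_ ?_
      · intro hmem
        have := mwalk_mem_not_seen g fuel (seen.set c true) (g c) c hmem
          (by simpa using hc)
        rw [getD_set_eq _ _ _ _ _ (by simpa using hc)] at this
        simp at this
      · exact ih (seen.set c true) (g c) (by simpa using hG c hc)
          (by simpa using hG)

lemma markAll_length (l : List Nat) (seen : List Bool) :
    (markAll seen l).length = seen.length := by
  induction l generalizing seen with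
  | nil => rfl
  | cons c t ih =>
    show (markAll (seen.set c true) t).length = seen.length
    rw [ih]; simp

lemma markAll_getD (l : List Nat) (seen : List Bool) (w : Nat) (hw : w < seen.length) :
    ((markAll seen l).getD w false = true ↔ seen.getD w false = true ∨ w ∈ l) := by
  induction l generalizing seen with
  | nil => simp [markAll]
  | cons c t ih =>
    show ((markAll (seen.set c true) t).getD w false = true ↔ _)
    rw [ih (seen.set c true) (by simpa using hw)]
    rw [getD_set_eq _ _ _ _ _ hw]
    by_cases hwc : w = c
    · subst hwc; simp
    · simp [hwc]

-- ---- the round lemma: one outer iteration of A marks exactly the class of s ----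

lemma round_lemma (g : Nat → Nat) (n : Nat) (H : ∀ w < n, g w < n)
    (s : Nat) (hs : s < n) (seen : List Bool) (hlen : seen.length = n)
    (hS : ∀ w < n, (seen.getD w false = true ↔ Mlbl g n w < s)) :
    (∀ x, x ∈ mwalk g (n+1) seen s ↔ (x < n ∧ Mlbl g n x = s)) ∧
    (mwalk g (n+1) seen s).length = cnt g n s ∧
    (∀ w < n, ((markAll seen (mwalk g (n+1) seen s)).getD w false = true ↔
        Mlbl g n w < s + 1)) := by
  have hfuel : seen.count false < n + 1 := by
    have := List.count_le_length (a := false) (l := seen); omega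
  obtain ⟨hget, hstop⟩ := mwalk_path g n H (n+1) seen s hlen hs hfuel
  set l := mwalk g (n+1) seen s with hl
  have hG : ∀ w < seen.length, g w < seen.length := by
    intro w hw; rw [hlen] at hw ⊢; exact H w hw
  have hmem_iff : ∀ x, x ∈ l ↔ x < n ∧ Mlbl g n x = s := by
    intro x
    constructor
    · intro hx
      have hxn : x < n := mwalk_mem_lt g n H (n+1) seen s hs x hx
      have hxseen : seen.getD x false = false :=
        mwalk_mem_not_seen g (n+1) seen s x hx (by omega)
      have h1 : ¬ (Mlbl g n x < s) := by
        intro hlt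
        have := (hS x hxn).mpr hlt
        rw [this] at hxseen; simp at hxseen
      obtain ⟨i, hi, hix⟩ := List.mem_iff_getElem.mp hx
      have h2 : Mlbl g n x ≤ s :=
        Mlbl_min g n H s x hs ⟨i, by rw [← hix]; exact (hget i hi).symm⟩
      exact ⟨hxn, by omega⟩
    · rintro ⟨hxn, hMx⟩
      obtain ⟨k0, hk0⟩ := Mlbl_reaches g n x H hxn
      rw [hMx] at hk0
      have claim : ∀ k, g^[k] s = x → x ∈ l := by
        intro k
        induction k using Nat.strong_induction_on with
        | _ k ihk =>
          intro hkx
          by_cases hkL : k < l.length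
          · rw [← hget k hkL] at hkx
            rw [← hkx]; exact List.getElem_mem hkL
          · rcases hstop with hstop | hstop
            · have hdn : g^[l.length] s < n := iter_lt g n H s hs _
              have hMd : Mlbl g n (g^[l.length] s) < s := (hS _ hdn).mp hstop
              obtain ⟨j, hj⟩ := Mlbl_reaches g n (g^[l.length] s) H hdn
              have hreach : g^[(k - l.length) + j] (Mlbl g n (g^[l.length] s)) = x := by
                rw [Function.iterate_add_apply, hj, ← Function.iterate_add_apply,
                  (by omega : k - l.length + l.length = k)]
                exact hkx
              have := Mlbl_min g n H _ x (Mlbl_lt g n _ hdn) ⟨_, hreach⟩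
              omega
            · obtain ⟨j, hjL, hjx⟩ := List.mem_iff_getElem.mp hstop
              have hper : g^[l.length] s = g^[j] s := by
                rw [hget j hjL] at hjx; exact hjx.symm
              have hk' : g^[k - (l.length - j)] s = x := by
                rw [(by omega : k - (l.length - j) = (k - l.length) + j),
                  Function.iterate_add_apply, ← hper, ← Function.iterate_add_apply,
                  (by omega : k - l.length + l.length = k)]
                exact hkx
              exact ihk _ (by omega) hk'
      exact claim k0 hk0
  refine ⟨hmem_iff, ?_, ?_⟩
  · have hnd : l.Nodup := mwalk_nodup g (n+1) seen s (by omega) hG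
    have hnd2 : ((List.range n).filter (fun w => Mlbl g n w = s)).Nodup :=
      List.Nodup.filter _ List.nodup_range
    have hperm : l.Perm ((List.range n).filter (fun w => Mlbl g n w = s)) :=
      (List.perm_ext_iff_of_nodup hnd hnd2).mpr (by
        intro a
        rw [hmem_iff a]
        simp [List.mem_filter, List.mem_range])
    exact hperm.length_eq
  · intro w hw
    rw [markAll_getD l seen w (by omega)]
    rw [hS w hw]
    constructor
    · rintro (h | h)
      · omega
      · have := (hmem_iff w).mp h; omega
    · intro h
      by_cases hlt : Mlbl g n w < s
      · exact Or.inl hlt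
      · exact Or.inr ((hmem_iff w).mpr ⟨hw, by omega⟩)

-- ---- correspondence of port A's walk with the model walk ----

lemma walkA_eq_mwalk (nums : List Int)
    (hpre : ∀ v ∈ nums, -(nums.length : Int) ≤ v ∧ v < (nums.length : Int)) :
    ∀ (fuel : Nat) (seen : List Bool) (i : Int) (step : Int),
      seen.length = nums.length →
      -(nums.length : Int) ≤ i → i < (nums.length : Int) →
      walkA nums fuel seen i step =
        (markAll seen (mwalk (gfun nums) fuel seen (widx nums.length i)),
         step + ((mwalk (gfun nums) fuel seen (widx nums.length i)).length : Int)) := by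
  intro fuel
  induction fuel with
  | zero => intro seen i step hlen h1 h2; simp [walkA, mwalk, markAll]
  | succ fuel ih =>
    intro seen i step hlen h1 h2
    have hb1 : -(seen.length : Int) ≤ i := by rw [hlen]; exact h1
    have hb2 : i < (seen.length : Int) := by rw [hlen]; exact h2
    have hwi : widx seen.length i = widx nums.length i := by rw [hlen]
    have hcn : widx nums.length i < nums.length := widx_lt _ _ h1 h2
    rw [walkA, pyGet?_widx seen i false hb1 hb2, hwi]
    cases hsb : seen.getD (widx nums.length i) false with
    | true =>
      rw [mwalk_eq_nil _ _ _ _ hsb]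
      simp [markAll]
    | false =>
      rw [mwalk_eq_cons _ _ _ _ hsb]
      have hset : PySem.List.pySetD seen i true = seen.set (widx nums.length i) true := by
        rw [pySetD_widx seen i true hb1 hb2, hwi]
      have hj : PySem.List.pyGet? nums i = some (nums.getD (widx nums.length i) 0) :=
        pyGet?_widx nums i 0 h1 h2
      have hjmem : nums.getD (widx nums.length i) 0 ∈ nums := by
        rw [getD_eq_getElem' _ _ _ hcn]; exact List.getElem_mem hcn
      obtain ⟨hj1, hj2⟩ := hpre _ hjmem
      simp only [hj, hset]
      rw [ih (seen.set (widx nums.length i) true) _ (step + 1)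
        (by rw [List.length_set]; exact hlen) hj1 hj2]
      show (markAll (seen.set (widx nums.length i) true) _, _) = (markAll (seen.set (widx nums.length i) true) _, _)
      have hgc : widx nums.length (nums.getD (widx nums.length i) 0)
          = gfun nums (widx nums.length i) := rfl
      rw [hgc]
      refine Prod.ext rfl ?_
      simp only [List.length_cons]
      push_cast
      ring

-- ---- A's outer loop ----

lemma gfun_lt (nums : List Int)
    (hpre : ∀ v ∈ nums, -(nums.length : Int) ≤ v ∧ v < (nums.length : Int)) :
    ∀ w < nums.length, gfun nums w < nums.length := by
  intro w hw
  have hmem : nums.getD w 0 ∈ nums := by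
    rw [getD_eq_getElem' _ _ _ hw]; exact List.getElem_mem hw
  obtain ⟨h1, h2⟩ := hpre _ hmem
  exact widx_lt _ _ h1 h2

lemma A_loop (nums : List Int)
    (hpre : ∀ v ∈ nums, -(nums.length : Int) ≤ v ∧ v < (nums.length : Int)) :
    ∀ s, s ≤ nums.length →
      ∃ seen : List Bool,
        (List.range s).foldl
          (fun st (k : Nat) =>
            let r := walkA nums (nums.length+1) st.1 (k : Int) st.2.2
            (r.1, max st.2.1 r.2, (0:Int)))
          (List.replicate nums.length false, (0:Int), (0:Int))
          = (seen,
             (List.range s).foldl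
               (fun a t => max a ((cnt (gfun nums) nums.length t : Nat) : Int)) 0,
             (0:Int)) ∧
        seen.length = nums.length ∧
        (∀ w < nums.length,
          (seen.getD w false = true ↔ Mlbl (gfun nums) nums.length w < s)) := by
  intro s
  induction s with
  | zero =>
    intro _
    refine ⟨List.replicate nums.length false, by simp, by simp, ?_⟩
    intro w hw
    simp
  | succ s ihs =>
    intro hs1
    obtain ⟨seen, hfold, hlen, hS⟩ := ihs (by omega)
    have hsn : s < nums.length := by omega
    obtain ⟨hmem, hlenl, hmark⟩ := round_lemma (gfun nums) nums.length
      (gfun_lt nums hpre) s hsn seen hlen hS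
    rw [List.range_succ, List.foldl_append, hfold]
    simp only [List.foldl_cons, List.foldl_nil]
    rw [walkA_eq_mwalk nums hpre _ seen (s : Int) 0 hlen (by omega) (by omega)]
    rw [widx_natCast _ _]
    refine ⟨markAll seen (mwalk (gfun nums) (nums.length+1) seen s), ?_, ?_, ?_⟩
    · rw [List.foldl_append, List.foldl_cons, List.foldl_nil, hlenl]
      norm_num
    · rw [markAll_length]; exact hlen
    · intro w hw; exact hmark w hw

lemma A_eq_mid (nums : List Int)
    (hpre : ∀ v ∈ nums, -(nums.length : Int) ≤ v ∧ v < (nums.length : Int)) :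
    arrayNesting2 nums =
      (List.range nums.length).foldl
        (fun a t => max a ((cnt (gfun nums) nums.length t : Nat) : Int)) 0 := by
  obtain ⟨seen, hfold, _, _⟩ := A_loop nums hpre nums.length le_rfl
  show ((PySem.List.pyRange 0 (nums.length : Int) 1).foldl
    (fun st i =>
      let r := walkA nums (nums.length+1) st.1 i st.2.2
      (r.1, max st.2.1 r.2, (0 : Int)))
    (List.replicate nums.length false, (0 : Int), (0 : Int))).2.1 = _
  rw [PySem.List.pyRange_one]
  have h0 : (((nums.length : Int) - 0).toNat) = nums.length := by omega
  rw [h0]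
  have hfn : (fun k : Nat => (0:Int) + (k:Int)) = (fun k : Nat => ((k:Int))) := by
    funext k; ring
  rw [hfn, List.foldl_map, hfold]

-- ---- B's pass: model correspondence and invariants ----

-- ---- B's pass at the model level: invariants ----

def InvB (g : Nat → Nat) (n : Nat) (m : List Int) : Prop :=
  m.length = n ∧ ∀ w < n, (Mlbl g n w : Int) ≤ m.getD w 0 ∧ m.getD w 0 ≤ (w : Int)

lemma mstep_length (g : Nat → Nat) (st : List Int × Bool) (u : Nat) :
    (mstep g st u).1.length = st.1.length := by
  unfold mstep; split <;> simp

lemma mstep_mono (g : Nat → Nat) (st : List Int × Bool) (u w : Nat)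
    (hw : w < st.1.length) : (mstep g st u).1.getD w 0 ≤ st.1.getD w 0 := by
  unfold mstep
  split
  · next h =>
    simp only
    rw [getD_set_eq _ _ _ _ _ hw]
    split
    · next he => rw [he]; omega
    · exact le_refl _
  · exact le_refl _

lemma mstep_flag (g : Nat → Nat) (st : List Int × Bool) (u : Nat)
    (h : st.2 = true) : (mstep g st u).2 = true := by
  unfold mstep; split
  · rfl
  · exact h

lemma mstep_false (g : Nat → Nat) (st : List Int × Bool) (u : Nat)
    (h : (mstep g st u).2 = false) :
    mstep g st u = st ∧ ¬ (st.1.getD u 0 < st.1.getD (g u) 0) := by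
  unfold mstep at h ⊢
  by_cases hc : st.1.getD u 0 < st.1.getD (g u) 0
  · rw [if_pos hc] at h; simp at h
  · rw [if_neg hc]; exact ⟨rfl, hc⟩

lemma fold_mstep_mono (g : Nat → Nat) (ss : List Nat) :
    ∀ (st : List Int × Bool) (w : Nat), w < st.1.length →
      (ss.foldl (mstep g) st).1.getD w 0 ≤ st.1.getD w 0 := by
  induction ss with
  | nil => intro st w _; exact le_refl _
  | cons u t ih =>
    intro st w hw
    rw [List.foldl_cons]
    exact le_trans (ih (mstep g st u) w (by rw [mstep_length]; exact hw))
      (mstep_mono g st u w hw)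

lemma fold_mstep_flag (g : Nat → Nat) (ss : List Nat) :
    ∀ st : List Int × Bool, st.2 = true → (ss.foldl (mstep g) st).2 = true := by
  induction ss with
  | nil => intro st h; exact h
  | cons u t ih =>
    intro st h
    rw [List.foldl_cons]
    exact ih _ (mstep_flag g st u h)

lemma fold_mstep_prop (g : Nat → Nat) (ss : List Nat) :
    ∀ (st : List Int × Bool) (u : Nat), u ∈ ss → u < st.1.length →
      g u < st.1.length →
      (ss.foldl (mstep g) st).1.getD (g u) 0 ≤ st.1.getD u 0 := by
  induction ss with
  | nil => intro st u h; simp at h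
  | cons v t ih =>
    intro st u hu hun hgu
    rw [List.foldl_cons]
    rcases List.mem_cons.mp hu with rfl | hu
    · refine le_trans (fold_mstep_mono g t (mstep g st u) (g u)
        (by rw [mstep_length]; exact hgu)) ?_
      unfold mstep
      split
      · next h =>
        simp only
        rw [getD_set_eq _ _ _ _ _ hgu]
        simp
      · next h => omega
    · exact le_trans
        (ih (mstep g st v) u hu (by rw [mstep_length]; exact hun)
          (by rw [mstep_length]; exact hgu))
        (mstep_mono g st v u hun)

lemma mstep_inv (g : Nat → Nat) (n : Nat) (H : ∀ w < n, g w < n)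
    (st : List Int × Bool) (u : Nat) (hu : u < n) (hInv : InvB g n st.1) :
    InvB g n (mstep g st u).1 := by
  obtain ⟨hlen, hpt⟩ := hInv
  unfold mstep
  split
  · next h =>
    refine ⟨by simpa using hlen, ?_⟩
    intro w hw
    simp only
    rw [getD_set_eq _ _ _ _ _ (by omega)]
    by_cases he : w = g u
    · rw [if_pos he, he]
      obtain ⟨hl1, hl2⟩ := hpt u hu
      obtain ⟨hl3, hl4⟩ := hpt (g u) (H u hu)
      have hg := Mlbl_g g n H u hu
      constructor
      · have hgc : ((Mlbl g n (g u) : Nat) : Int) ≤ ((Mlbl g n u : Nat) : Int) := by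
          exact_mod_cast hg
        omega
      · omega
    · rw [if_neg he]; exact hpt w hw
  · exact ⟨hlen, hpt⟩

lemma fold_mstep_inv (g : Nat → Nat) (n : Nat) (H : ∀ w < n, g w < n)
    (ss : List Nat) :
    ∀ st : List Int × Bool, (∀ u ∈ ss, u < n) → InvB g n st.1 →
      InvB g n ((ss.foldl (mstep g) st).1) := by
  induction ss with
  | nil => intro st _ h; exact h
  | cons u t ih =>
    intro st hb hInv
    rw [List.foldl_cons]
    exact ih _ (fun v hv => hb v (List.mem_cons_of_mem _ hv))
      (mstep_inv g n H st u (hb u (List.mem_cons_self)) hInv)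

lemma fold_mstep_nochange (g : Nat → Nat) (ss : List Nat) :
    ∀ st : List Int × Bool, (ss.foldl (mstep g) st).2 = false →
      (ss.foldl (mstep g) st).1 = st.1 ∧
      (∀ u ∈ ss, ¬ (st.1.getD u 0 < st.1.getD (g u) 0)) := by
  induction ss with
  | nil => intro st _; exact ⟨rfl, by simp⟩
  | cons u t ih =>
    intro st hflag
    rw [List.foldl_cons] at hflag ⊢
    have hst' : (mstep g st u).2 = false := by
      by_contra hcontra
      have : (mstep g st u).2 = true := by
        cases h : (mstep g st u).2
        · exact absurd h hcontra
        · rfl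
      rw [fold_mstep_flag g t _ this] at hflag
      simp at hflag
    obtain ⟨heq, hcond⟩ := mstep_false g st u hst'
    rw [heq] at hflag ⊢
    obtain ⟨h1, h2⟩ := ih st hflag
    refine ⟨h1, ?_⟩
    intro v hv
    rcases List.mem_cons.mp hv with rfl | hv
    · exact hcond
    · exact h2 v hv

lemma eq_Mlist (g : Nat → Nat) (n : Nat) (m : List Int) (hlen : m.length = n)
    (hpt : ∀ w < n, m.getD w 0 = (Mlbl g n w : Int)) : m = Mlist g n := by
  apply List.ext_getElem
  · simp [Mlist, hlen]
  · intro w h1 h2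
    have hw : w < n := by omega
    have := hpt w hw
    rw [getD_eq_getElem' _ _ _ h1] at this
    rw [this]
    simp [Mlist]

lemma fixpoint_eq_M (g : Nat → Nat) (n : Nat) (H : ∀ w < n, g w < n)
    (m : List Int) (hInv : InvB g n m)
    (hfix : ∀ u < n, ¬ (m.getD u 0 < m.getD (g u) 0)) :
    ∀ w < n, m.getD w 0 = (Mlbl g n w : Int) := by
  obtain ⟨hlen, hpt⟩ := hInv
  have hchain : ∀ (k s : Nat), s < n → m.getD (g^[k] s) 0 ≤ (s : Int) := by
    intro k
    induction k with
    | zero => intro s hs; simpa using (hpt s hs).2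
    | succ k ihk =>
      intro s hs
      rw [Function.iterate_succ_apply']
      have hu : g^[k] s < n := iter_lt g n H s hs k
      have := hfix _ hu
      have := ihk s hs
      omega
  intro w hw
  obtain ⟨k, hk⟩ := Mlbl_reaches g n w H hw
  have h1 : m.getD w 0 ≤ (Mlbl g n w : Int) := by
    have := hchain k (Mlbl g n w) (Mlbl_lt g n w hw)
    rwa [hk] at this
  have h2 := (hpt w hw).1
  omega

lemma passB_eq_mpass (nums : List Int)
    (hpre : ∀ v ∈ nums, -(nums.length : Int) ≤ v ∧ v < (nums.length : Int))
    (m : List Int) (flag : Bool) (hm : m.length = nums.length) :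
    passB nums (m, flag) = mpass (gfun nums) nums.length (m, flag) := by
  have key : ∀ (ss : List Nat), (∀ u ∈ ss, u < nums.length) →
      ∀ st : List Int × Bool, st.1.length = nums.length →
      (ss.map (fun k : Nat => (k : Int))).foldl
        (fun st u =>
          match PySem.List.pyGet? nums u with
          | none => st
          | some t =>
            match PySem.List.pyGet? st.1 t with
            | none => st
            | some mt =>
              let mu := PySem.List.pyGetD st.1 u 0
              if mu < mt then (PySem.List.pySetD st.1 t mu, true) else st) st
        = ss.foldl (mstep (gfun nums)) st := by
    intro ss
    induction ss with
    | nil => intro _ st _; rfl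
    | cons u t ih =>
      intro hb st hst
      have hu : u < nums.length := hb u List.mem_cons_self
      rw [List.map_cons, List.foldl_cons, List.foldl_cons]
      have hnu : PySem.List.pyGet? nums ((u : Nat) : Int) = some (nums.getD u 0) := by
        rw [PySem.List.pyGet?_natCast, List.getElem?_eq_getElem hu,
          getD_eq_getElem' _ _ _ hu]
      have hjmem : nums.getD u 0 ∈ nums := by
        rw [getD_eq_getElem' _ _ _ hu]; exact List.getElem_mem hu
      obtain ⟨hj1, hj2⟩ := hpre _ hjmem
      have hmt : PySem.List.pyGet? st.1 (nums.getD u 0)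
          = some (st.1.getD (gfun nums u) 0) := by
        rw [pyGet?_widx st.1 (nums.getD u 0) 0 (by rw [hst]; exact hj1)
          (by rw [hst]; exact hj2), hst]
        rfl
      have hpset : PySem.List.pySetD st.1 (nums.getD u 0) (st.1.getD u 0)
          = st.1.set (gfun nums u) (st.1.getD u 0) := by
        rw [pySetD_widx st.1 (nums.getD u 0) _ (by rw [hst]; exact hj1)
          (by rw [hst]; exact hj2), hst]
        rfl
      have hstep :
          (match PySem.List.pyGet? nums ((u : Nat) : Int) with
          | none => st
          | some t =>
            match PySem.List.pyGet? st.1 t with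
            | none => st
            | some mt =>
              let mu := PySem.List.pyGetD st.1 ((u : Nat) : Int) 0
              if mu < mt then (PySem.List.pySetD st.1 t mu, true) else st)
          = mstep (gfun nums) st u := by
        rw [hnu]
        simp only [hmt, PySem.List.pyGetD_natCast]
        rw [hpset]
        rfl
      rw [hstep]
      exact ih (fun v hv => hb v (List.mem_cons_of_mem _ hv)) _
        (by rw [mstep_length]; exact hst)
  unfold passB mpass
  rw [PySem.List.pyRange_one]
  have h0 : (((nums.length : Int) - 0).toNat) = nums.length := by omega
  rw [h0]
  have hfn : (fun k : Nat => (0:Int) + (k:Int)) = (fun k : Nat => ((k:Int))) := by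
    funext k; ring
  rw [hfn]
  exact key (List.range nums.length) (fun u hu => List.mem_range.mp hu) (m, flag) hm

lemma loopB_correct (nums : List Int)
    (hpre : ∀ v ∈ nums, -(nums.length : Int) ≤ v ∧ v < (nums.length : Int)) :
    ∀ (fuel : Nat) (m : List Int), InvB (gfun nums) nums.length m →
      (∀ s < nums.length, ∀ k : Nat, k + fuel ≤ nums.length + 1 →
        m.getD ((gfun nums)^[k] s) 0 ≤ (s : Int)) →
      loopB nums fuel m = Mlist (gfun nums) nums.length := by
  have H := gfun_lt nums hpre
  intro fuel
  induction fuel with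
  | zero =>
    intro m hInv hq
    show m = _
    apply eq_Mlist _ _ _ hInv.1
    intro w hw
    refine le_antisymm ?_ ((hInv.2 w hw).1)
    obtain ⟨k, hk⟩ := Mlbl_reaches (gfun nums) nums.length w H hw
    obtain ⟨k', hk', hke⟩ := iter_shorten (gfun nums) nums.length H
      (Mlbl (gfun nums) nums.length w) (Mlbl_lt _ _ w hw) k
    have := hq (Mlbl (gfun nums) nums.length w) (Mlbl_lt _ _ w hw) k' (by omega)
    rwa [hke, hk] at this
  | succ fuel ih =>
    intro m hInv hq
    rw [loopB]
    rw [passB_eq_mpass nums hpre m false hInv.1]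
    unfold mpass
    by_cases hflag : (List.foldl (mstep (gfun nums)) (m, false) (List.range nums.length)).2 = true
    · rw [if_pos hflag]
      have hInv' : InvB (gfun nums) nums.length
          ((List.foldl (mstep (gfun nums)) (m, false) (List.range nums.length)).1) :=
        fold_mstep_inv _ _ H _ _ (fun u hu => List.mem_range.mp hu) hInv
      apply ih _ hInv'
      intro s hs k hk
      cases k with
      | zero => simpa using (hInv'.2 s hs).2
      | succ k =>
        rw [Function.iterate_succ_apply']
        have hu : (gfun nums)^[k] s < nums.length := iter_lt _ _ H s hs k
        have h1 : (List.foldl (mstep (gfun nums)) (m, false) (List.range nums.length)).1.getD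
            ((gfun nums) ((gfun nums)^[k] s)) 0 ≤ m.getD ((gfun nums)^[k] s) 0 :=
          fold_mstep_prop _ _ (m, false) _ (List.mem_range.mpr hu)
            (by rw [hInv.1]; exact hu) (by rw [hInv.1]; exact H _ hu)
        have h2 := hq s hs k (by omega)
        omega
    · rw [if_neg hflag]
      obtain ⟨heq, hfix⟩ := fold_mstep_nochange (gfun nums) _ (m, false)
        (by simpa using hflag)
      rw [heq]
      apply eq_Mlist _ _ _ hInv.1
      exact fixpoint_eq_M _ _ H m hInv
        (fun u hu => hfix u (List.mem_range.mpr hu))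

-- ---- B's histogram and max ----

lemma hist_fold (vs : List Int) :
    ∀ cs : List Int, (∀ v ∈ vs, 0 ≤ v ∧ v < (cs.length : Int)) →
      ((vs.foldl (fun cs lbl => PySem.List.pySetD cs lbl (PySem.List.pyGetD cs lbl 0 + 1)) cs).length = cs.length ∧
       ∀ t < cs.length,
        (vs.foldl (fun cs lbl => PySem.List.pySetD cs lbl (PySem.List.pyGetD cs lbl 0 + 1)) cs).getD t 0
          = cs.getD t 0 + (vs.count ((t : Nat) : Int) : Int)) := by
  induction vs with
  | nil => intro cs _; exact ⟨rfl, by simp⟩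
  | cons v rest ih =>
    intro cs hb
    obtain ⟨hv0, hvlt⟩ := hb v List.mem_cons_self
    have hvn : v.toNat < cs.length := by omega
    have hstep : PySem.List.pySetD cs v (PySem.List.pyGetD cs v 0 + 1)
        = cs.set v.toNat (cs.getD v.toNat 0 + 1) := by
      rw [PySem.List.pySetD_of_nonneg cs _ hv0,
        PySem.List.pyGetD_eq_getElem cs 0 hv0 (by omega),
        getD_eq_getElem' _ _ _ hvn]
    rw [List.foldl_cons, hstep]
    have hlen' : (cs.set v.toNat (cs.getD v.toNat 0 + 1)).length = cs.length := by simp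
    obtain ⟨ihlen, ihpt⟩ := ih (cs.set v.toNat (cs.getD v.toNat 0 + 1))
      (by intro x hx; rw [hlen']; exact hb x (List.mem_cons_of_mem _ hx))
    refine ⟨by rw [ihlen, hlen'], ?_⟩
    intro t ht
    rw [ihpt t (by omega)]
    rw [getD_set_eq _ _ _ _ _ ht]
    rw [List.count_cons]
    by_cases hte : t = v.toNat
    · have hveq : v = ((t : Nat) : Int) := by omega
      rw [if_pos hte, hte, if_pos (by simp [hveq])]
      push_cast
      omega
    · have hvne : ¬ (v == ((t : Nat) : Int)) := by simp; omega
      rw [if_neg hte, if_neg (by simpa using hvne)]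
      push_cast
      omega

lemma count_Mlist (g : Nat → Nat) (n t : Nat) :
    (Mlist g n).count ((t : Nat) : Int) = cnt g n t := by
  rw [Mlist, cnt, List.count_eq_countP, List.countP_map,
    ← List.countP_eq_length_filter]
  apply List.countP_congr
  intro w _
  simp [Function.comp]

lemma maxD_nonneg (l : List Int) (h : ∀ x ∈ l, 0 ≤ x) :
    PySem.List.maxD l (fun x => x) 0 = l.foldl max 0 := by
  cases l with
  | nil => rfl
  | cons x t =>
    rw [PySem.List.maxD, PySem.List.max?_id_cons]
    have hx : max 0 x = x := max_eq_right (h x List.mem_cons_self)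
    rw [List.foldl_cons, hx]
    rfl

lemma B_eq_mid (nums : List Int)
    (hpre : ∀ v ∈ nums, -(nums.length : Int) ≤ v ∧ v < (nums.length : Int)) :
    arrayNesting2_alt nums =
      (List.range nums.length).foldl
        (fun a t => max a ((cnt (gfun nums) nums.length t : Nat) : Int)) 0 := by
  have H := gfun_lt nums hpre
  have hm0len : (PySem.List.pyRange 0 (nums.length : Int) 1).length = nums.length := by
    rw [PySem.List.length_pyRange_one]; omega
  have hm0 : ∀ w < nums.length,
      (PySem.List.pyRange 0 (nums.length : Int) 1).getD w 0 = (w : Int) := by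
    intro w hw
    rw [getD_eq_getElem' _ _ _ (by rw [hm0len]; exact hw),
      PySem.List.getElem_pyRange_one]
    ring
  have hInv0 : InvB (gfun nums) nums.length (PySem.List.pyRange 0 (nums.length : Int) 1) := by
    refine ⟨hm0len, ?_⟩
    intro w hw
    rw [hm0 w hw]
    exact ⟨by exact_mod_cast Mlbl_le_self (gfun nums) nums.length w, le_refl _⟩
  have hloop := loopB_correct nums hpre (nums.length + 1)
    (PySem.List.pyRange 0 (nums.length : Int) 1) hInv0
    (by
      intro s hs k hk
      have hk0 : k = 0 := by omega
      subst hk0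
      simpa using (hInv0.2 s hs).2)
  show PySem.List.maxD
      ((loopB nums (nums.length + 1) (PySem.List.pyRange 0 (nums.length : Int) 1)).foldl
        (fun cs lbl => PySem.List.pySetD cs lbl (PySem.List.pyGetD cs lbl 0 + 1))
        (List.replicate nums.length (0 : Int)))
      (fun x => x) 0 = _
  rw [hloop]
  have hbounds : ∀ v ∈ Mlist (gfun nums) nums.length,
      0 ≤ v ∧ v < ((List.replicate nums.length (0 : Int)).length : Int) := by
    intro v hv
    rw [Mlist] at hv
    obtain ⟨w, hw, rfl⟩ := List.mem_map.mp hv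
    have hwn : w < nums.length := List.mem_range.mp hw
    have := Mlbl_lt (gfun nums) nums.length w hwn
    constructor
    · positivity
    · simp; omega
  obtain ⟨hclen, hcpt⟩ := hist_fold (Mlist (gfun nums) nums.length)
    (List.replicate nums.length (0 : Int)) hbounds
  have hcounts : (Mlist (gfun nums) nums.length).foldl
      (fun cs lbl => PySem.List.pySetD cs lbl (PySem.List.pyGetD cs lbl 0 + 1))
      (List.replicate nums.length (0 : Int))
      = (List.range nums.length).map
        (fun t => ((cnt (gfun nums) nums.length t : Nat) : Int)) := by
    apply List.ext_getElem
    · rw [hclen]; simp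
    · intro w h1 h2
      have hw : w < nums.length := by simpa using h2
      rw [← getD_eq_getElem' _ _ 0 h1]
      rw [hcpt w (by simpa using hw)]
      have hrep : (List.replicate nums.length (0 : Int)).getD w 0 = 0 := by
        rw [getD_eq_getElem' _ _ _ (by simpa using hw)]; simp
      rw [hrep, count_Mlist]
      simp
  rw [hcounts]
  rw [maxD_nonneg _ (by
    intro x hx
    obtain ⟨t, _, rfl⟩ := List.mem_map.mp hx
    positivity)]
  rw [List.foldl_map]

-- ===== VERDICT (by name: the statement is the Claim_ definition above) =====
theorem arrayNesting2_spec : Claim_equal_arrayNesting2 := by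
  intro nums _ hpre
  unfold Spec_arrayNesting2
  rw [A_eq_mid nums hpre, B_eq_mid nums hpre]
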